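-- pv_equiv track=rewrite | github.com/Shirajuki/jonnynl | TDT4109 - Informasjonsteknologi, grunnkurs/ovinger/oving3/fibonacci.py | f
-- ===== SOURCE A (Python) =====
-- def f(k):
--     f0 = 0
--     f1 = 1
--
--     summen = f0
--     for i in range(k):
--         forrige = f0 + f1
--         f0 = f1
--         summen += f0
--         f1 = forrige
--     return summen
-- ===== SOURCE B (Python) =====
-- def _fib_pair(n):
--     # returns (F(n), F(n+1)) by fast doubling
--     if n == 0:
--         return (0, 1)
--     a, b = _fib_pair(n >> 1)
--     c = a * (2 * b - a)
--     d = a * a + b * b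
--     if n & 1:
--         return (d, c + d)
--     return (c, d)
--
--
-- def f(k):
--     if k <= 0:
--         return 0
--     return _fib_pair(k + 2)[0] - 1
-- ===== Notes on version B (the rewrite author's own statement) =====
-- stated objective: alternative
-- what changed: Replaces the iterative Fibonacci accumulation loop by the closed form sum = F(k+2)-1 computed with fast-doubling recursion.
import Mathlib
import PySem

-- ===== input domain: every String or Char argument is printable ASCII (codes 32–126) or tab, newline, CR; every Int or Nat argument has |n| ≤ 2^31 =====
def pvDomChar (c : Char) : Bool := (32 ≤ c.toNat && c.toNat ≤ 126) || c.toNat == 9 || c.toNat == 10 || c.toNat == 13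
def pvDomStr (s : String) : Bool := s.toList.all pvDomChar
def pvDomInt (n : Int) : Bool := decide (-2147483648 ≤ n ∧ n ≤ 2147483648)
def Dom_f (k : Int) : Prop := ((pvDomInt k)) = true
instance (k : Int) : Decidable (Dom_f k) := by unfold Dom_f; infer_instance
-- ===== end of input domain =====

-- B replaces A's Fibonacci accumulation loop by the identity sum = F(k+2) - 1 computed with fast-doubling recursion (a different algorithm).


-- ===== PORT A =====
-- state (f0, f1, summen); one loop step of A's body
def fStep (st : Int × Int × Int) (_ : Int) : Int × Int × Int :=
  let forrige := st.1 + st.2.1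
  (st.2.1, forrige, st.2.2 + st.2.1)

def f (k : Int) : Int :=
  ((PySem.List.pyRange 0 k 1).foldl fStep (0, 1, 0)).2.2

-- ===== PORT B =====
-- fast doubling: returns (F(n), F(n+1))
def fibPair (n : Nat) : Int × Int :=
  if h : n = 0 then (0, 1)
  else
    let p := fibPair (n / 2)
    let c := p.1 * (2 * p.2 - p.1)
    let d := p.1 * p.1 + p.2 * p.2
    if n % 2 = 1 then (d, c + d) else (c, d)
decreasing_by exact Nat.div_lt_self (Nat.pos_of_ne_zero h) (by omega)

def f_alt (k : Int) : Int :=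
  if k ≤ 0 then 0 else (fibPair (k + 2).toNat).1 - 1

-- ===== PRECONDITION & SPEC =====
def Spec_f (k : Int) (out : Int) : Prop := out = f_alt k
instance (k : Int) (out : Int) : Decidable (Spec_f k out) := by unfold Spec_f; infer_instance

-- ===== CLAIM (what is proved, stated in full; the proofs are below) =====
def Claim_equal_f : Prop := ∀ (k : Int), Dom_f k → Spec_f k (f k)

-- ===== LEMMAS AND PROOFS =====

theorem fibPair_eq (n : Nat) : fibPair n = ((Nat.fib n : Int), (Nat.fib (n + 1) : Int)) := by
  induction n using Nat.strong_induction_on with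
  | _ n ih =>
    rw [fibPair]
    by_cases h : n = 0
    · simp [h]
    · have hlt : n / 2 < n := Nat.div_lt_self (Nat.pos_of_ne_zero h) (by omega)
      rw [ih _ hlt, dif_neg h]
      simp only
      rcases Nat.even_or_odd n with he | ho
      · obtain ⟨m, hm⟩ := he
        have hn2 : n / 2 = m := by omega
        have hmod : ¬ (n % 2 = 1) := by omega
        subst hm
        simp only [hn2, if_neg hmod]
        have h1 : Nat.fib (m + m) = Nat.fib m * (2 * Nat.fib (m + 1) - Nat.fib m) := by
          simpa [two_mul] using Nat.fib_two_mul m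
        have h2 : Nat.fib (m + m + 1) = Nat.fib (m + 1) ^ 2 + Nat.fib m ^ 2 := by
          simpa [two_mul] using Nat.fib_two_mul_add_one m
        have hle : Nat.fib m ≤ 2 * Nat.fib (m + 1) :=
          le_trans (Nat.fib_le_fib_succ) (by omega)
        refine Prod.ext ?_ ?_ <;> simp only
        · rw [h1]; push_cast [Nat.sub_add_cancel, hle]; ring
        · rw [h2]; push_cast; ring
      · obtain ⟨m, hm⟩ := ho
        have hn2 : n / 2 = m := by omega
        have hmod : n % 2 = 1 := by omega
        subst hm
        simp only [hn2, if_pos hmod]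
        have h1 : Nat.fib (2 * m) = Nat.fib m * (2 * Nat.fib (m + 1) - Nat.fib m) :=
          Nat.fib_two_mul m
        have h2 : Nat.fib (2 * m + 1) = Nat.fib (m + 1) ^ 2 + Nat.fib m ^ 2 :=
          Nat.fib_two_mul_add_one m
        have h3 : Nat.fib (2 * m + 1 + 1) = Nat.fib (2 * m) + Nat.fib (2 * m + 1) :=
          Nat.fib_add_two
        have hle : Nat.fib m ≤ 2 * Nat.fib (m + 1) :=
          le_trans (Nat.fib_le_fib_succ) (by omega)
        refine Prod.ext ?_ ?_ <;> simp only
        · rw [h2]; push_cast; ring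
        · rw [h3, h1, h2]; push_cast [Nat.sub_add_cancel, hle]; ring

theorem loop_inv (l : List Int) (m : Nat) :
    l.foldl fStep ((Nat.fib m : Int), (Nat.fib (m + 1) : Int), (Nat.fib (m + 2) : Int) - 1)
      = ((Nat.fib (m + l.length) : Int), (Nat.fib (m + l.length + 1) : Int),
         (Nat.fib (m + l.length + 2) : Int) - 1) := by
  induction l generalizing m with
  | nil => simp
  | cons a t ih =>
    simp only [List.foldl_cons, List.length_cons]
    have hstep : fStep ((Nat.fib m : Int), (Nat.fib (m + 1) : Int), (Nat.fib (m + 2) : Int) - 1) a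
        = ((Nat.fib (m + 1) : Int), (Nat.fib (m + 2) : Int), (Nat.fib (m + 3) : Int) - 1) := by
      simp only [fStep]
      have h2 : Nat.fib (m + 2) = Nat.fib m + Nat.fib (m + 1) := Nat.fib_add_two
      have h3 : Nat.fib (m + 3) = Nat.fib (m + 1) + Nat.fib (m + 2) := Nat.fib_add_two
      refine Prod.ext ?_ (Prod.ext ?_ ?_) <;> simp [h2, h3] <;> push_cast <;> ring
    rw [hstep, ih (m + 1)]
    have harg : m + 1 + t.length = m + (t.length + 1) := by omega
    rw [harg]

-- ===== VERDICT (by name: the statement is the Claim_ definition above) =====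
theorem f_spec : Claim_equal_f := by
  intro k _
  show f k = f_alt k
  unfold f f_alt
  by_cases hk : k ≤ 0
  · rw [PySem.List.pyRange_one_eq_nil (by omega), if_pos hk]
    simp
  · rw [if_neg hk]
    have h0 := loop_inv (PySem.List.pyRange 0 k 1) 0
    simp only [Nat.fib_zero, Nat.fib_one, Nat.zero_add] at h0
    norm_num at h0
    rw [h0]
    rw [fibPair_eq]
    have hlen : (PySem.List.pyRange 0 k 1).length = k.toNat := by
      simpa using PySem.List.length_pyRange_one 0 k
    have : (k + 2).toNat = (PySem.List.pyRange 0 k 1).length + 2 := by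
      rw [hlen]; omega
    rw [this]
    simp
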